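-- pv_equiv track=rewrite | github.com/inkyu0103/BOJ | Dynamic Programming/10844.py | solve
-- ===== SOURCE A (Python) =====
-- def solve(arr):
--     tmp = [0]*10
--     for i in range(10):
--         if i == 0 :
--              tmp[i+1] += arr[i]
--
--         elif i == 9:
--              tmp[i-1] += arr[i]
--         else:
--             tmp[i-1] += arr[i]
--             tmp[i+1] += arr[i]
--     return tmp
-- ===== SOURCE B (Python) =====
-- def solve(arr):
--     return [(arr[j - 1] if j >= 1 else 0) + (arr[j + 1] if j <= 8 else 0)
--             for j in range(10)]
-- ===== Notes on version B (the rewrite author's own statement) =====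
-- stated objective: simpler
-- what changed: Replaces the scatter loop (each source digit i pushes arr[i] into tmp[i-1]/tmp[i+1] with +=) by a direct gather comprehension computing each output slot j as arr[j-1]+arr[j+1] with boundary zeros.
import Mathlib
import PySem

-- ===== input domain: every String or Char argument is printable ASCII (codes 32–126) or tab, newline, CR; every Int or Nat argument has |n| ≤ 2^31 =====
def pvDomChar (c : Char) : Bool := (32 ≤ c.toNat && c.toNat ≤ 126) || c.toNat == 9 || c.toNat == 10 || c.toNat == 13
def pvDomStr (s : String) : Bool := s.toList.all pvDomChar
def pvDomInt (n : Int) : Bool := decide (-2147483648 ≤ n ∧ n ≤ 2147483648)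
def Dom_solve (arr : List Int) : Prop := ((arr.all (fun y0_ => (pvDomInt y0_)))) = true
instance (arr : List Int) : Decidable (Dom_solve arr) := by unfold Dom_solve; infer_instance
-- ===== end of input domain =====

-- B replaces A's scatter loop (+= pushes into tmp[i±1]) by a direct gather comprehension tmp[j] = arr[j-1] + arr[j+1]; objective: simpler.


-- ===== PORT A =====
-- A's loop body: scatter arr[i] into tmp[i+1] and/or tmp[i-1] with +=.
-- arr[i] is read with pyGet? (IndexError = none; Pre_ guarantees it is some).
def solveStep (arr : List Int) (tmp : List Int) (i : Nat) : List Int :=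
  let v := (PySem.List.pyGet? arr (i : Int)).getD 0
  if i == 0 then
    tmp.set (i + 1) (tmp.getD (i + 1) 0 + v)
  else if i == 9 then
    tmp.set (i - 1) (tmp.getD (i - 1) 0 + v)
  else
    let tmp := tmp.set (i - 1) (tmp.getD (i - 1) 0 + v)
    tmp.set (i + 1) (tmp.getD (i + 1) 0 + v)

def solve (arr : List Int) : List Int :=
  (List.range 10).foldl (solveStep arr) (List.replicate 10 0)

-- ===== PORT B =====
def solve_alt (arr : List Int) : List Int :=
  (List.range 10).map (fun j =>
    (if j ≥ 1 then (PySem.List.pyGet? arr ((j : Int) - 1)).getD 0 else 0) +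
    (if j ≤ 8 then (PySem.List.pyGet? arr ((j : Int) + 1)).getD 0 else 0))

-- ===== PRECONDITION & SPEC =====
-- Pre_ excludes lists shorter than 10, on which both A and B raise IndexError.
def Pre_solve (arr : List Int) : Prop := 10 ≤ arr.length
instance (arr : List Int) : Decidable (Pre_solve arr) := by unfold Pre_solve; infer_instance
def pvWitness_solve : List Int := [1, 1, 1, 1, 1, 1, 1, 1, 1, 0]

def Spec_solve (arr : List Int) (out : List Int) : Prop := out = solve_alt arr
instance (arr : List Int) (out : List Int) : Decidable (Spec_solve arr out) := by unfold Spec_solve; infer_instance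

-- ===== CLAIM (what is proved, stated in full; the proofs are below) =====
def Claim_equal_solve : Prop := ∀ (arr : List Int), Dom_solve arr → Pre_solve arr → Spec_solve arr (solve arr)

-- ===== LEMMAS AND PROOFS =====
theorem if_le_cast_right {α : Type} (n : Nat) (c k : Int) (x y : α) (h : c ≤ k) :
    (if c ≤ k + (n : Int) then x else y) = x := by
  rw [if_pos (le_add_of_le_of_nonneg h (Int.natCast_nonneg n))]

theorem solve_eq_of_cons (a0 a1 a2 a3 a4 a5 a6 a7 a8 a9 : Int) (rest : List Int) :
    solve (a0 :: a1 :: a2 :: a3 :: a4 :: a5 :: a6 :: a7 :: a8 :: a9 :: rest) =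
    solve_alt (a0 :: a1 :: a2 :: a3 :: a4 :: a5 :: a6 :: a7 :: a8 :: a9 :: rest) := by
  simp [solve, solve_alt, solveStep, PySem.List.pyGet?, PySem.List.pyIdx?, List.range_succ]
  ring_nf
  simp [if_le_cast_right]

-- ===== VERDICT (by name: the statement is the Claim_ definition above) =====
theorem solve_spec : Claim_equal_solve := by
  intro arr _ hpre
  unfold Pre_solve at hpre
  match arr, hpre with
  | a0 :: a1 :: a2 :: a3 :: a4 :: a5 :: a6 :: a7 :: a8 :: a9 :: rest, _ =>
    exact solve_eq_of_cons a0 a1 a2 a3 a4 a5 a6 a7 a8 a9 rest
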